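-- pv_equiv track=rewrite | github.com/NikidodikYT/StylistAI | backend/app/api/v1/ai.py | is_base_item_category
-- ===== SOURCE A (Python) =====
-- def is_base_item_category(slot_type: str, base_category: str) -> bool:
--     """Проверяет совпадение слота с базовой категорией."""
--     base_lower = base_category.lower()
--     slot_lower = slot_type.lower()
--
--     category_to_slot = {
--         "jacket": "outerwear", "coat": "outerwear", "blazer": "outerwear",
--         "cardigan": "outerwear", "bomber": "outerwear", "varsity": "outerwear",
--         "parka": "outerwear", "pants": "bottom", "jeans": "bottom",
--         "trousers": "bottom", "shorts": "bottom", "skirt": "bottom",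
--         "shirt": "top", "t-shirt": "top", "tshirt": "top", "blouse": "top",
--         "sweater": "top", "hoodie": "top", "sweatshirt": "top",
--     }
--
--     for cat_keyword, expected_slot in category_to_slot.items():
--         if cat_keyword in base_lower:
--             if expected_slot == slot_lower:
--                 return True
--
--     return False
-- ===== SOURCE B (Python) =====
-- SLOT_TO_KEYWORDS = {
--     "outerwear": ["jacket", "coat", "blazer", "cardigan", "bomber", "varsity", "parka"],
--     "bottom": ["pants", "jeans", "trousers", "shorts", "skirt"],
--     "top": ["shirt", "t-shirt", "tshirt", "blouse", "sweater", "hoodie", "sweatshirt"],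
-- }
--
-- def is_base_item_category(slot_type: str, base_category: str) -> bool:
--     base_lower = base_category.lower()
--     slot_lower = slot_type.lower()
--     return any(kw in base_lower for kw in SLOT_TO_KEYWORDS.get(slot_lower, []))
-- ===== Notes on version B (the rewrite author's own statement) =====
-- stated objective: idiomatic
-- what changed: Inverted the keyword->slot dict into a slot->keywords table, so B indexes by the slot first and scans only that slot's keywords with any(), instead of scanning all 19 keywords with an inner slot comparison.
import Mathlib
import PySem

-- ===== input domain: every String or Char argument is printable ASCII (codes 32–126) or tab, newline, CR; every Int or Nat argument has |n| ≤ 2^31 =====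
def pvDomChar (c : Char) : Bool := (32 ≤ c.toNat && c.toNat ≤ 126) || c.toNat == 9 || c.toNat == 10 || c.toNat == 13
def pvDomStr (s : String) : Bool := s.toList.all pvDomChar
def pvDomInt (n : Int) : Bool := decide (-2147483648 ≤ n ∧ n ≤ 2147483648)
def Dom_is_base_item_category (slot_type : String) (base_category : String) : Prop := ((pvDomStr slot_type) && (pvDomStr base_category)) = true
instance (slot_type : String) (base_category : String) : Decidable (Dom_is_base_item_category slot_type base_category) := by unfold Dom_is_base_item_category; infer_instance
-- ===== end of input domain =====

-- B inverts A's keyword->slot mapping into a slot->keywords table and looks the slot up first (idiomatic; same results).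

-- ===== PORT A =====
-- the literal dict of A, as an insertion-ordered association list (its .items())
def pvCategoryToSlot : List (String × String) :=
  [("jacket", "outerwear"), ("coat", "outerwear"), ("blazer", "outerwear"),
   ("cardigan", "outerwear"), ("bomber", "outerwear"), ("varsity", "outerwear"),
   ("parka", "outerwear"), ("pants", "bottom"), ("jeans", "bottom"),
   ("trousers", "bottom"), ("shorts", "bottom"), ("skirt", "bottom"),
   ("shirt", "top"), ("t-shirt", "top"), ("tshirt", "top"), ("blouse", "top"),
   ("sweater", "top"), ("hoodie", "top"), ("sweatshirt", "top")]

-- A's for-loop with its early return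
def pvALoop (items : List (String × String)) (base_lower slot_lower : String) : Bool :=
  match items with
  | [] => false
  | (cat_keyword, expected_slot) :: rest =>
    if PySem.Str.isIn cat_keyword base_lower then
      if expected_slot == slot_lower then true
      else pvALoop rest base_lower slot_lower
    else pvALoop rest base_lower slot_lower

def is_base_item_category (slot_type : String) (base_category : String) : Bool :=
  let base_lower := PySem.Str.lower base_category
  let slot_lower := PySem.Str.lower slot_type
  pvALoop pvCategoryToSlot base_lower slot_lower

-- ===== PORT B =====
-- B's module-level inverted table SLOT_TO_KEYWORDS
def pvSlotToKeywords : PySem.Dict String (List String) :=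
  ((PySem.Dict.empty.insert "outerwear"
      ["jacket", "coat", "blazer", "cardigan", "bomber", "varsity", "parka"]).insert "bottom"
      ["pants", "jeans", "trousers", "shorts", "skirt"]).insert "top"
      ["shirt", "t-shirt", "tshirt", "blouse", "sweater", "hoodie", "sweatshirt"]

def is_base_item_category_alt (slot_type : String) (base_category : String) : Bool :=
  let base_lower := PySem.Str.lower base_category
  let slot_lower := PySem.Str.lower slot_type
  (pvSlotToKeywords.getD slot_lower []).any (fun kw => PySem.Str.isIn kw base_lower)

-- ===== PRECONDITION & SPEC =====
def Spec_is_base_item_category (slot_type : String) (base_category : String) (out : Bool) : Prop := out = is_base_item_category_alt slot_type base_category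
instance (slot_type : String) (base_category : String) (out : Bool) : Decidable (Spec_is_base_item_category slot_type base_category out) := by unfold Spec_is_base_item_category; infer_instance

-- ===== CLAIM (what is proved, stated in full; the proofs are below) =====
def Claim_equal_is_base_item_category : Prop := ∀ (slot_type : String) (base_category : String), Dom_is_base_item_category slot_type base_category → Spec_is_base_item_category slot_type base_category (is_base_item_category slot_type base_category)

-- ===== LEMMAS AND PROOFS =====

-- A's loop is the disjunction over matching pairs
theorem pvALoop_eq_any (items : List (String × String)) (bl sl : String) :
    pvALoop items bl sl = items.any (fun p => PySem.Str.isIn p.1 bl && p.2 == sl) := by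
  induction items with
  | nil => rfl
  | cons p rest ih =>
    obtain ⟨kw, slot⟩ := p
    simp only [pvALoop, List.any_cons, ih]
    by_cases h1 : PySem.Str.isIn kw bl <;> by_cases h2 : (slot == sl) = true <;>
      simp_all

-- ===== VERDICT (by name: the statement is the Claim_ definition above) =====
theorem is_base_item_category_spec : Claim_equal_is_base_item_category := by
  intro slot_type base_category _
  unfold Spec_is_base_item_category is_base_item_category is_base_item_category_alt
  simp only [pvALoop_eq_any]
  generalize PySem.Str.lower base_category = bl
  generalize PySem.Str.lower slot_type = sl
  have k1 : pvSlotToKeywords.getD "outerwear" [] =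
      ["jacket", "coat", "blazer", "cardigan", "bomber", "varsity", "parka"] := by decide
  have k2 : pvSlotToKeywords.getD "bottom" [] =
      ["pants", "jeans", "trousers", "shorts", "skirt"] := by decide
  have k3 : pvSlotToKeywords.getD "top" [] =
      ["shirt", "t-shirt", "tshirt", "blouse", "sweater", "hoodie", "sweatshirt"] := by decide
  by_cases h1 : sl = "outerwear"
  · subst h1; simp [pvCategoryToSlot, k1]
  · by_cases h2 : sl = "bottom"
    · subst h2; simp [pvCategoryToSlot, k2]
    · by_cases h3 : sl = "top"
      · subst h3; simp [pvCategoryToSlot, k3]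
      · have g1 : ("outerwear" == sl) = false := by
          simp only [beq_eq_false_iff_ne]; exact fun h => h1 h.symm
        have g2 : ("bottom" == sl) = false := by
          simp only [beq_eq_false_iff_ne]; exact fun h => h2 h.symm
        have g3 : ("top" == sl) = false := by
          simp only [beq_eq_false_iff_ne]; exact fun h => h3 h.symm
        have gd : pvSlotToKeywords.getD sl [] = [] := by
          simp [pvSlotToKeywords, PySem.Dict.getD, PySem.Dict.get?, PySem.Dict.insert,
            PySem.Dict.empty, List.find?, g1, g2, g3]
        simp [pvCategoryToSlot, gd, g1, g2, g3]
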